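-- pv_equiv track=rewrite | github.com/rprovine/hawaii-business-intelligence-system | data-collectors/scrapers/hawaii_business_finder.py | _guess_industry
-- ===== SOURCE A (Python) =====
-- def _guess_industry(name: str) -> str:
--     """Guess industry from company name"""
--     name_lower = name.lower()
--
--     if any(word in name_lower for word in ['hotel', 'resort', 'inn']):
--         return 'Hospitality'
--     elif any(word in name_lower for word in ['health', 'medical', 'hospital', 'clinic']):
--         return 'Healthcare'
--     elif any(word in name_lower for word in ['bank', 'financial', 'credit']):
--         return 'Other'
--     elif any(word in name_lower for word in ['construct', 'build', 'contract']):
--         return 'Construction'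
--     elif any(word in name_lower for word in ['tech', 'software', 'digital']):
--         return 'Technology'
--     elif any(word in name_lower for word in ['restaurant', 'food', 'dining']):
--         return 'Food Service'
--     else:
--         return 'Other'
-- ===== SOURCE B (Python) =====
-- # Text-driven scan: walk every start position of the lowered name once and match
-- # keywords as prefixes there (naive multi-pattern matching), keeping the hit with
-- # the best (lowest) priority; A instead asks, per category, whether any keyword is
-- # a substring via an if/elif chain.
-- KEYWORDS = [
--     ('hotel', 'Hospitality'), ('resort', 'Hospitality'), ('inn', 'Hospitality'),
--     ('health', 'Healthcare'), ('medical', 'Healthcare'),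
--     ('hospital', 'Healthcare'), ('clinic', 'Healthcare'),
--     ('bank', 'Other'), ('financial', 'Other'), ('credit', 'Other'),
--     ('construct', 'Construction'), ('build', 'Construction'),
--     ('contract', 'Construction'),
--     ('tech', 'Technology'), ('software', 'Technology'), ('digital', 'Technology'),
--     ('restaurant', 'Food Service'), ('food', 'Food Service'),
--     ('dining', 'Food Service'),
-- ]
--
-- def _guess_industry(name: str) -> str:
--     """Guess industry from company name"""
--     s = name.lower()
--     best = None  # (priority, category) of the best keyword matched so far
--     for i in range(len(s)):
--         for j, (kw, cat) in enumerate(KEYWORDS):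
--             if s.startswith(kw, i) and (best is None or j < best[0]):
--                 best = (j, cat)
--     return best[1] if best is not None else 'Other'
-- ===== Notes on version B (the rewrite author's own statement) =====
-- stated objective: alternative
-- what changed: Replaced the keyword-driven if/elif substring chain by a text-driven scan: one pass over every start position of the lowered name, matching the flat keyword table as prefixes there (naive multi-pattern matching) and keeping the lowest-priority-index hit.
import Mathlib
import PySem

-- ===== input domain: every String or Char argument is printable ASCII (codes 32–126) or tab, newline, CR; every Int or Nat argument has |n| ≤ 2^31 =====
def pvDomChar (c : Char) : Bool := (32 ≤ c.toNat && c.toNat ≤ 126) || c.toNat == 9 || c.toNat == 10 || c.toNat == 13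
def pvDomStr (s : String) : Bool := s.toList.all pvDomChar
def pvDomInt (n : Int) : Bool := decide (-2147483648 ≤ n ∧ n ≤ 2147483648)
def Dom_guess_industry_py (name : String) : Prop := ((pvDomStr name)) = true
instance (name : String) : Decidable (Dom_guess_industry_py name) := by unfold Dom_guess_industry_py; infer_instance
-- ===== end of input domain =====

-- B replaces A's keyword-driven if/elif substring chain by a text-driven scan over the
-- positions of the lowered name, matching a flat keyword table as prefixes there and
-- keeping the best-priority hit (alternative algorithm; same cost).


-- ===== PORT A =====
def guess_industry_py (name : String) : String :=
  let name_lower := PySem.Str.lower name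
  if ["hotel", "resort", "inn"].any (fun word => PySem.Str.isIn word name_lower) then
    "Hospitality"
  else if ["health", "medical", "hospital", "clinic"].any (fun word => PySem.Str.isIn word name_lower) then
    "Healthcare"
  else if ["bank", "financial", "credit"].any (fun word => PySem.Str.isIn word name_lower) then
    "Other"
  else if ["construct", "build", "contract"].any (fun word => PySem.Str.isIn word name_lower) then
    "Construction"
  else if ["tech", "software", "digital"].any (fun word => PySem.Str.isIn word name_lower) then
    "Technology"
  else if ["restaurant", "food", "dining"].any (fun word => PySem.Str.isIn word name_lower) then
    "Food Service"
  else
    "Other"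

-- ===== PORT B =====
def pvKeywords : List (String × String) :=
  [("hotel", "Hospitality"), ("resort", "Hospitality"), ("inn", "Hospitality"),
   ("health", "Healthcare"), ("medical", "Healthcare"),
   ("hospital", "Healthcare"), ("clinic", "Healthcare"),
   ("bank", "Other"), ("financial", "Other"), ("credit", "Other"),
   ("construct", "Construction"), ("build", "Construction"), ("contract", "Construction"),
   ("tech", "Technology"), ("software", "Technology"), ("digital", "Technology"),
   ("restaurant", "Food Service"), ("food", "Food Service"), ("dining", "Food Service")]

-- s.startswith(kw, i) with 0 ≤ i is exactly s[i:].startswith(kw)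
def pvStartsAt (s : String) (i : Int) (kw : String) : Bool :=
  PySem.Str.startswith (PySem.Str.slice s (some i) none) kw

def guess_industry_py_alt (name : String) : String :=
  let s := PySem.Str.lower name
  let best :=
    (PySem.List.pyRange 0 (PySem.Str.len s) 1).foldl
      (fun best i =>
        (PySem.List.enumerate pvKeywords 0).foldl
          (fun best jk =>
            if pvStartsAt s i jk.2.1 &&
               (match best with | none => true | some b => decide (jk.1 < b.1)) then
              some (jk.1, jk.2.2)
            else best)
          best)
      none
  match best with
  | some b => b.2
  | none => "Other"

-- ===== PRECONDITION & SPEC =====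
def Spec_guess_industry_py (name : String) (out : String) : Prop := out = guess_industry_py_alt name
instance (name : String) (out : String) : Decidable (Spec_guess_industry_py name out) := by unfold Spec_guess_industry_py; infer_instance

-- ===== CLAIM =====
def Claim_equal_guess_industry_py : Prop := ∀ (name : String), Dom_guess_industry_py name → Spec_guess_industry_py name (guess_industry_py name)

-- ===== LEMMAS AND PROOFS =====
-- proof-side helpers
def pvCombine (b r : Option (Int × String)) : Option (Int × String) :=
  match b, r with
  | none, r => r
  | some b, none => some b
  | some b, some r => if r.1 < b.1 then some r else some b

def pvFirstAux (s : String) (i : Int) (off : Int) : List (String × String) → Option (Int × String)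
  | [] => none
  | (kw, cat) :: ks => if pvStartsAt s i kw then some (off, cat) else pvFirstAux s i (off+1) ks

def pvChainL (s : String) (L : List Int) (off : Int) : List (String × String) → Option (Int × String)
  | [] => none
  | (kw, cat) :: ks => if L.any (fun i => pvStartsAt s i kw) then some (off, cat) else pvChainL s L (off+1) ks

theorem pvCombine_none (b : Option (Int × String)) : pvCombine b none = b := by
  cases b <;> rfl

theorem pvFirstAux_ge (s : String) (i : Int) :
    ∀ (ks : List (String × String)) (off : Int) (r : Int × String),
    pvFirstAux s i off ks = some r → off ≤ r.1 := by
  intro ks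
  induction ks with
  | nil => intro off r h; simp [pvFirstAux] at h
  | cons p ks ih =>
    intro off r h
    obtain ⟨kw, cat⟩ := p
    simp only [pvFirstAux] at h
    by_cases hs : pvStartsAt s i kw
    · simp [hs] at h; subst h; simp
    · rw [if_neg hs] at h
      have := ih (off+1) r h
      omega

theorem pvCombine_firstAux_of_lt (s : String) (i : Int) (b : Int × String) :
    ∀ (ks : List (String × String)) (off : Int), b.1 < off →
    pvCombine (some b) (pvFirstAux s i off ks) = some b := by
  intro ks off hb
  cases h : pvFirstAux s i off ks with
  | none => rfl
  | some r =>
    have := pvFirstAux_ge s i ks off r h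
    simp [pvCombine]
    omega

-- inner loop characterization
theorem pvInner (s : String) (i : Int) :
    ∀ (ks : List (String × String)) (off : Int) (best : Option (Int × String)),
    (PySem.List.enumerate ks off).foldl
      (fun best jk =>
        if pvStartsAt s i jk.2.1 &&
           (match best with | none => true | some b => decide (jk.1 < b.1)) then
          some (jk.1, jk.2.2)
        else best)
      best
    = pvCombine best (pvFirstAux s i off ks) := by
  intro ks
  induction ks with
  | nil => intro off best; simp [PySem.List.enumerate_nil, pvFirstAux, pvCombine_none]
  | cons p ks ih =>
    intro off best
    obtain ⟨kw, cat⟩ := p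
    rw [PySem.List.enumerate_cons]
    simp only [List.foldl_cons]
    rw [ih]
    by_cases hs : pvStartsAt s i kw
    · simp only [pvFirstAux, hs, if_pos]
      cases best with
      | none =>
        simp only [Bool.true_and, pvCombine]
        exact pvCombine_firstAux_of_lt s i (off, cat) ks (off+1) (by omega)
      | some b =>
        simp only [Bool.true_and, pvCombine]
        by_cases hlt : off < b.1
        · simp only [hlt, decide_true, if_pos]
          exact pvCombine_firstAux_of_lt s i (off, cat) ks (off+1) (by omega)
        · have hd : decide (off < b.1) = false := by simp [hlt]
          simp only [hd, if_neg, Bool.false_eq_true, not_false_eq_true]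
          rw [if_neg hlt]
          exact pvCombine_firstAux_of_lt s i b ks (off+1) (by omega)
    · have hd : pvStartsAt s i kw = false := by simp [hs]
      simp only [pvFirstAux, hd, Bool.false_and, Bool.false_eq_true, not_false_eq_true, if_neg]

theorem pvStep_keeps (s : String) (off : Int) (cat kw : String) (ks : List (String × String)) (i : Int) :
    pvCombine (some (off, cat)) (pvFirstAux s i off ((kw, cat) :: ks)) = some (off, cat) := by
  simp only [pvFirstAux]
  by_cases hs : pvStartsAt s i kw
  · simp [hs, pvCombine]
  · rw [if_neg hs]
    exact pvCombine_firstAux_of_lt s i (off, cat) ks (off+1) (by simp)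

theorem pvFold_stay (s : String) (off : Int) (cat kw : String) (ks : List (String × String)) :
    ∀ (L : List Int),
    L.foldl (fun b i => pvCombine b (pvFirstAux s i off ((kw, cat) :: ks))) (some (off, cat)) = some (off, cat) := by
  intro L
  induction L with
  | nil => rfl
  | cons i L ih => simp only [List.foldl_cons, pvStep_keeps, ih]

theorem pvFold_hit (s : String) (off : Int) (cat kw : String) (ks : List (String × String)) :
    ∀ (L : List Int) (acc : Option (Int × String)),
    (acc = none ∨ ∃ b, acc = some b ∧ off < b.1) →
    L.any (fun i => pvStartsAt s i kw) = true →
    L.foldl (fun b i => pvCombine b (pvFirstAux s i off ((kw, cat) :: ks))) acc = some (off, cat) := by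
  intro L
  induction L with
  | nil => intro acc _ h; simp at h
  | cons i L ih =>
    intro acc hacc hany
    simp only [List.foldl_cons]
    by_cases hi : pvStartsAt s i kw
    · have hstep : pvCombine acc (pvFirstAux s i off ((kw, cat) :: ks)) = some (off, cat) := by
        simp only [pvFirstAux, hi, if_pos]
        rcases hacc with h | ⟨b, hb, hlt⟩
        · subst h; rfl
        · subst hb; simp [pvCombine, hlt]
      rw [hstep]
      exact pvFold_stay s off cat kw ks L
    · have hfh : pvFirstAux s i off ((kw, cat) :: ks) = pvFirstAux s i (off+1) ks := by
        simp only [pvFirstAux]; rw [if_neg hi]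
      rw [hfh]
      have hany' : L.any (fun i => pvStartsAt s i kw) = true := by
        simp only [List.any_cons] at hany
        rcases Bool.or_eq_true_iff.mp hany with h | h
        · exact absurd h hi
        · exact h
      apply ih
      · rcases hacc with h | ⟨b, hb, hlt⟩
        · subst h
          cases hr : pvFirstAux s i (off+1) ks with
          | none => left; rfl
          | some r =>
            right
            exact ⟨r, by simp [pvCombine], by have := pvFirstAux_ge s i ks (off+1) r hr; omega⟩
        · subst hb
          cases hr : pvFirstAux s i (off+1) ks with
          | none => right; exact ⟨b, by simp [pvCombine], hlt⟩
          | some r =>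
            have hge := pvFirstAux_ge s i ks (off+1) r hr
            simp only [pvCombine]
            by_cases hc : r.1 < b.1
            · right; exact ⟨r, by rw [if_pos hc], by omega⟩
            · right; exact ⟨b, by rw [if_neg hc], hlt⟩
      · exact hany'

theorem pvFoldConst (L : List Int) (b : Option (Int × String)) :
    L.foldl (fun b (_ : Int) => b) b = b := by
  induction L generalizing b with
  | nil => rfl
  | cons i L ih => simp only [List.foldl_cons]; exact ih b

theorem pvOuter (s : String) :
    ∀ (ks : List (String × String)) (off : Int) (L : List Int),
    L.foldl (fun b i => pvCombine b (pvFirstAux s i off ks)) none = pvChainL s L off ks := by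
  intro ks
  induction ks with
  | nil =>
    intro off L
    have h1 : L.foldl (fun b i => pvCombine b (pvFirstAux s i off ([] : List (String × String)))) none
        = L.foldl (fun b (_ : Int) => b) none := by
      apply PySem.List.foldl_congr_mem
      intro b i _
      simp [pvFirstAux, pvCombine_none]
    rw [h1, pvFoldConst]
    rfl
  | cons p ks ih =>
    intro off L
    obtain ⟨kw, cat⟩ := p
    by_cases hA : L.any (fun i => pvStartsAt s i kw)
    · rw [pvFold_hit s off cat kw ks L none (Or.inl rfl) hA]
      simp [pvChainL, hA]
    · have hall : ∀ i ∈ L, pvStartsAt s i kw = false := by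
        intro i hi
        by_contra h
        exact hA (List.any_eq_true.mpr ⟨i, hi, by simpa using h⟩)
      have h1 : L.foldl (fun b i => pvCombine b (pvFirstAux s i off ((kw, cat) :: ks))) none
          = L.foldl (fun b i => pvCombine b (pvFirstAux s i (off+1) ks)) none := by
        apply PySem.List.foldl_congr_mem
        intro b i hi
        simp only [pvFirstAux]
        rw [if_neg (by simp [hall i hi])]
      rw [h1, ih]
      simp only [pvChainL]
      rw [if_neg (by simp [hA])]

theorem pvStartsAt_iff (s : String) (i : Int) (hi : 0 ≤ i) (kw : String) :
    pvStartsAt s i kw = true ↔ kw.toList <+: s.toList.drop i.toNat := by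
  rw [pvStartsAt, PySem.Str.startswith_eq, PySem.Str.toList_slice,
    PySem.Chars.slice_eq_listSlice, PySem.List.slice_from _ hi, PySem.Chars.startswith_iff]

theorem pvAny_eq_isIn (s kw : String) (h : kw.toList ≠ []) :
    (PySem.List.pyRange 0 (PySem.Str.len s) 1).any (fun i => pvStartsAt s i kw)
      = PySem.Str.isIn kw s := by
  rw [Bool.eq_iff_iff, List.any_eq_true, PySem.Str.isIn_eq,
    ← PySem.Chars.exists_prefix_drop_iff_isIn]
  constructor
  · rintro ⟨i, hmem, hsw⟩
    have h0 : 0 ≤ i := (PySem.List.mem_pyRange_one.mp hmem).1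
    exact ⟨i.toNat, (pvStartsAt_iff s i h0 kw).mp hsw⟩
  · rintro ⟨j, hj⟩
    have hjlt : j < s.toList.length := by
      by_contra hge
      rw [List.drop_eq_nil_of_le (by omega)] at hj
      exact h (List.prefix_nil.mp hj)
    refine ⟨(j : Int), ?_, ?_⟩
    · rw [PySem.List.mem_pyRange_one, PySem.Str.len_eq]
      constructor <;> omega
    · rw [pvStartsAt_iff s j (by omega) kw]
      simpa using hj
theorem pvAlt_eq_chain (name : String) :
    guess_industry_py_alt name =
      (match pvChainL (PySem.Str.lower name)
          (PySem.List.pyRange 0 (PySem.Str.len (PySem.Str.lower name)) 1) 0 pvKeywords with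
       | some b => b.2
       | none => "Other") := by
  have h1 : (PySem.List.pyRange 0 (PySem.Str.len (PySem.Str.lower name)) 1).foldl
      (fun best jk_acc => (PySem.List.enumerate pvKeywords 0).foldl
          (fun best jk =>
            if pvStartsAt (PySem.Str.lower name) jk_acc jk.2.1 &&
               (match best with | none => true | some b => decide (jk.1 < b.1)) then
              some (jk.1, jk.2.2)
            else best)
          best) none
      = (PySem.List.pyRange 0 (PySem.Str.len (PySem.Str.lower name)) 1).foldl
          (fun b i => pvCombine b (pvFirstAux (PySem.Str.lower name) i 0 pvKeywords)) none := by
    apply PySem.List.foldl_congr_mem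
    intro acc i _
    exact pvInner (PySem.Str.lower name) i pvKeywords 0 acc
  simp only [guess_industry_py_alt]
  rw [h1, pvOuter]

theorem pvMain (name : String) : guess_industry_py name = guess_industry_py_alt name := by
  rw [pvAlt_eq_chain]
  unfold guess_industry_py
  simp only [pvKeywords, pvChainL, List.any_cons, List.any_nil, Bool.or_false]
  rw [pvAny_eq_isIn (PySem.Str.lower name) "hotel" (by decide), pvAny_eq_isIn (PySem.Str.lower name) "resort" (by decide), pvAny_eq_isIn (PySem.Str.lower name) "inn" (by decide), pvAny_eq_isIn (PySem.Str.lower name) "health" (by decide), pvAny_eq_isIn (PySem.Str.lower name) "medical" (by decide), pvAny_eq_isIn (PySem.Str.lower name) "hospital" (by decide), pvAny_eq_isIn (PySem.Str.lower name) "clinic" (by decide), pvAny_eq_isIn (PySem.Str.lower name) "bank" (by decide), pvAny_eq_isIn (PySem.Str.lower name) "financial" (by decide), pvAny_eq_isIn (PySem.Str.lower name) "credit" (by decide), pvAny_eq_isIn (PySem.Str.lower name) "construct" (by decide), pvAny_eq_isIn (PySem.Str.lower name) "build" (by decide), pvAny_eq_isIn (PySem.Str.lower name) "contract" (by decide), pvAny_eq_isIn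 (PySem.Str.lower name) "tech" (by decide), pvAny_eq_isIn (PySem.Str.lower name) "software" (by decide), pvAny_eq_isIn (PySem.Str.lower name) "digital" (by decide), pvAny_eq_isIn (PySem.Str.lower name) "restaurant" (by decide), pvAny_eq_isIn (PySem.Str.lower name) "food" (by decide), pvAny_eq_isIn (PySem.Str.lower name) "dining" (by decide)]
  generalize PySem.Str.isIn "hotel" (PySem.Str.lower name) = b0
  generalize PySem.Str.isIn "resort" (PySem.Str.lower name) = b1
  generalize PySem.Str.isIn "inn" (PySem.Str.lower name) = b2
  generalize PySem.Str.isIn "health" (PySem.Str.lower name) = b3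
  generalize PySem.Str.isIn "medical" (PySem.Str.lower name) = b4
  generalize PySem.Str.isIn "hospital" (PySem.Str.lower name) = b5
  generalize PySem.Str.isIn "clinic" (PySem.Str.lower name) = b6
  generalize PySem.Str.isIn "bank" (PySem.Str.lower name) = b7
  generalize PySem.Str.isIn "financial" (PySem.Str.lower name) = b8
  generalize PySem.Str.isIn "credit" (PySem.Str.lower name) = b9
  generalize PySem.Str.isIn "construct" (PySem.Str.lower name) = b10
  generalize PySem.Str.isIn "build" (PySem.Str.lower name) = b11
  generalize PySem.Str.isIn "contract" (PySem.Str.lower name) = b12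
  generalize PySem.Str.isIn "tech" (PySem.Str.lower name) = b13
  generalize PySem.Str.isIn "software" (PySem.Str.lower name) = b14
  generalize PySem.Str.isIn "digital" (PySem.Str.lower name) = b15
  generalize PySem.Str.isIn "restaurant" (PySem.Str.lower name) = b16
  generalize PySem.Str.isIn "food" (PySem.Str.lower name) = b17
  generalize PySem.Str.isIn "dining" (PySem.Str.lower name) = b18
  cases b0 with
  | true => simp
  | false =>
    cases b1 with
    | true => simp
    | false =>
      cases b2 with
      | true => simp
      | false =>
        cases b3 with
        | true => simp
        | false =>
          cases b4 with
          | true => simp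
          | false =>
            cases b5 with
            | true => simp
            | false =>
              cases b6 with
              | true => simp
              | false =>
                cases b7 with
                | true => simp
                | false =>
                  cases b8 with
                  | true => simp
                  | false =>
                    cases b9 with
                    | true => simp
                    | false =>
                      cases b10 with
                      | true => simp
                      | false =>
                        cases b11 with
                        | true => simp
                        | false =>
                          cases b12 with
                          | true => simp
                          | false =>
                            cases b13 with
                            | true => simp
                            | false =>
                              cases b14 with
                              | true => simp
                              | false =>
                                cases b15 with
                                | true => simp
                                | false =>
                                  cases b16 with
                                  | true => simp
                                  | false =>
                                    cases b17 with
                                    | true => simp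
                                    | false =>
                                      cases b18 with
                                      | true => simp
                                      | false =>
                                        simp

-- ===== VERDICT =====
theorem guess_industry_py_spec : Claim_equal_guess_industry_py := by
  intro name _
  unfold Spec_guess_industry_py
  exact pvMain name
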